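-- pv_equiv track=rewrite | github.com/ericd13/Cours | ITC/Sup/TP/Codes/TP06.py | augMax
-- ===== SOURCE A (Python) =====
-- def augMax(liste):
--     n = len(liste)
--     augM = 0
--     for i in range(n-1):
--         for j in range(i, n):
--             aug = liste[j] - liste[i]
--             if aug > augM:
--                 augM = aug
--     return augM
-- ===== SOURCE B (Python) =====
-- def augMax(liste):
--     # Single pass: track the running minimum and the best gain so far.
--     if not liste:
--         return 0
--     best = 0
--     m = liste[0]
--     for x in liste[1:]:
--         if x - m > best:
--             best = x - m
--         if x < m:
--             m = x
--     return best
-- ===== Notes on version B (the rewrite author's own statement) =====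
-- stated objective: faster
-- what changed: Replaced the quadratic scan over all index pairs (i, j>=i) by a single left-to-right pass maintaining the running minimum and the best difference so far.
import Mathlib
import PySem

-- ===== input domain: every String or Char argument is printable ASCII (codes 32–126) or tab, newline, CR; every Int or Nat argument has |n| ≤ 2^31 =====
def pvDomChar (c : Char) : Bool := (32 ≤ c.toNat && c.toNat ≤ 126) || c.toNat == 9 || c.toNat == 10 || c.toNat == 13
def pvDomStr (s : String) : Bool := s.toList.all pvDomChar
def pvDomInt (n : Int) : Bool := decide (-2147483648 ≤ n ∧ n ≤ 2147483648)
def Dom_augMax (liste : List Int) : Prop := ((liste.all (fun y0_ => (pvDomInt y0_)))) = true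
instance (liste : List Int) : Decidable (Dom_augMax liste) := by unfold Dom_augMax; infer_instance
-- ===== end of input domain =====

-- B replaces A's quadratic all-pairs scan by one pass tracking the running minimum (faster).

-- ===== PORT A =====
def augMax (liste : List Int) : Int :=
  let n : Int := PySem.List.len liste
  (PySem.List.pyRange 0 (n - 1) 1).foldl
    (fun augM i =>
      (PySem.List.pyRange i n 1).foldl
        (fun augM j =>
          let aug := PySem.List.pyGetD liste j 0 - PySem.List.pyGetD liste i 0
          if aug > augM then aug else augM)
        augM)
    0

-- ===== PORT B =====
def augMaxGo (best m : Int) : List Int → Int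
  | [] => best
  | x :: xs => augMaxGo (if x - m > best then x - m else best) (if x < m then x else m) xs

def augMax_alt (liste : List Int) : Int :=
  match liste with
  | [] => 0
  | x :: xs => augMaxGo 0 x xs

-- ===== PRECONDITION & SPEC =====
def Spec_augMax (liste : List Int) (out : Int) : Prop := out = augMax_alt liste
instance (liste : List Int) (out : Int) : Decidable (Spec_augMax liste out) := by unfold Spec_augMax; infer_instance

-- ===== CLAIM (what is proved, stated in full; the proofs are below) =====
def Claim_equal_augMax : Prop := ∀ (liste : List Int), Dom_augMax liste → Spec_augMax liste (augMax liste)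

-- ===== LEMMAS AND PROOFS =====

theorem ifmax (a v : Int) : (if v > a then v else a) = max a v := by
  split <;> omega

theorem ifmin (m x : Int) : (if x < m then x else m) = min m x := by
  split <;> omega

-- best gain over xs buying at price m, accumulator a
def innerMax (m : Int) (a : Int) (xs : List Int) : Int :=
  xs.foldl (fun acc z => max acc (z - m)) a

theorem innerMax_nil (m a : Int) : innerMax m a [] = a := rfl

theorem innerMax_cons (m a z : Int) (zs : List Int) :
    innerMax m a (z :: zs) = innerMax m (max a (z - m)) zs := rfl

theorem innerMax_shift (m : Int) (xs : List Int) : ∀ a b, innerMax m (max a b) xs = max a (innerMax m b xs) := by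
  induction xs with
  | nil => intro a b; rfl
  | cons z zs ih =>
    intro a b
    rw [innerMax_cons, innerMax_cons]
    have : max (max a b) (z - m) = max a (max b (z - m)) := by omega
    rw [this, ih]

theorem innerMax_nonneg (m : Int) (a : Int) (xs : List Int) (h : 0 ≤ a) :
    0 ≤ innerMax m a xs :=
  le_trans h (PySem.List.le_foldl_max_int xs (fun z => z - m) a).1

theorem innerMin_split (m y : Int) (ys : List Int) :
    ∀ a b, innerMax (min m y) (max a b) ys = max (innerMax m a ys) (innerMax y b ys) := by
  induction ys with
  | nil => intro a b; rfl
  | cons z zs ih =>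
    intro a b
    rw [innerMax_cons, innerMax_cons, innerMax_cons]
    have : max (max a b) (z - min m y) = max (max a (z - m)) (max b (z - y)) := by omega
    rw [this, ih]

-- max of 0 and all differences liste[j] - liste[i], j ≥ i (self pairs contribute 0)
def specA : List Int → Int
  | [] => 0
  | x :: xs => max (innerMax x 0 xs) (specA xs)

theorem specA_nonneg : ∀ xs : List Int, 0 ≤ specA xs := by
  intro xs
  induction xs with
  | nil => exact le_refl 0
  | cons x xs ih => simp only [specA]; omega

-- ---- B equals specA ----

theorem go_eq (xs : List Int) : ∀ best m, 0 ≤ best →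
    augMaxGo best m xs = max best (specA (m :: xs)) := by
  induction xs with
  | nil =>
    intro best m h
    simp only [augMaxGo, specA, innerMax_nil]
    omega
  | cons y ys ih =>
    intro best m h
    rw [augMaxGo, ifmax, ifmin, ih _ _ (by omega)]
    simp only [specA, innerMax_cons]
    have h1 : ∀ a, innerMax (min m y) a ys = innerMax (min m y) (max a a) ys := by
      intro a; rw [max_self]
    rw [h1, innerMin_split]
    have h2 : innerMax m (max 0 (y - m)) ys = max (max 0 (y - m)) (innerMax m 0 ys) := by
      rw [← innerMax_shift, max_comm 0 (y - m), max_assoc, max_self]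
    rw [h2]
    omega

theorem alt_eq_specA (liste : List Int) : augMax_alt liste = specA liste := by
  cases liste with
  | nil => rfl
  | cons x xs =>
    simp only [augMax_alt]
    rw [go_eq xs 0 x (le_refl 0)]
    have := specA_nonneg (x :: xs)
    omega

-- ---- A equals specA ----

-- A with indices and slices made structural: Nat range, getD, drop
def augMaxD (liste : List Int) : Int :=
  (List.range (liste.length - 1)).foldl
    (fun acc k => innerMax (liste.getD k 0) acc (liste.drop k)) 0

theorem A_eq_D (liste : List Int) : augMax liste = augMaxD liste := by
  cases liste with
  | nil => rfl
  | cons x xs =>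
    unfold augMax augMaxD
    simp only [ifmax]
    rw [show ((PySem.List.len (x :: xs) : Int) - 1) = ((xs.length : Nat) : Int) by
          rw [PySem.List.len_eq, List.length_cons]; push_cast; omega]
    rw [show (x :: xs).length - 1 = xs.length by simp]
    rw [PySem.List.pyRange_zero_natCast]
    rw [List.foldl_map]
    apply PySem.List.foldl_congr_mem
    intro acc k hk
    have hk' : (0 : Int) ≤ (k : Int) := Int.natCast_nonneg k
    rw [PySem.List.foldl_pyRange_pyGetD (x :: xs) 0
          (fun acc z => max acc (z - PySem.List.pyGetD (x :: xs) (k : Int) 0)) acc hk']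
    simp [innerMax]

theorem D_shift (x : Int) (xs : List Int) (N : Nat) : ∀ a : Int,
    (List.range N).foldl
      (fun acc k => innerMax ((x :: xs).getD (k + 1) 0) acc ((x :: xs).drop (k + 1))) a
    = (List.range N).foldl (fun acc k => innerMax (xs.getD k 0) acc (xs.drop k)) a := by
  intro a
  apply PySem.List.foldl_congr_mem
  intro acc k hk
  simp [List.getD]

theorem D_thread (xs : List Int) (l : List Nat) : ∀ a b : Int,
    l.foldl (fun acc k => innerMax (xs.getD k 0) acc (xs.drop k)) (max a b)
    = max a (l.foldl (fun acc k => innerMax (xs.getD k 0) acc (xs.drop k)) b) := by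
  induction l with
  | nil => intro a b; rfl
  | cons k ks ih =>
    intro a b
    simp only [List.foldl_cons]
    rw [innerMax_shift, ih]

theorem D_eq_specA : ∀ liste : List Int, augMaxD liste = specA liste := by
  intro liste
  induction liste with
  | nil => rfl
  | cons x xs ih =>
    unfold augMaxD
    cases xs with
    | nil => rfl
    | cons y ys =>
      rw [show (x :: y :: ys).length - 1 = ((y :: ys).length - 1) + 1 by simp]
      rw [List.range_succ_eq_map]
      simp only [List.foldl_cons, List.foldl_map, Nat.succ_eq_add_one]
      rw [D_shift]
      have hinit : innerMax ((x :: y :: ys).getD 0 0) 0 (List.drop 0 (x :: y :: ys))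
          = innerMax x 0 (y :: ys) := by
        simp only [List.getD, List.drop, List.getElem?_cons_zero, Option.getD_some]
        rw [innerMax_cons]
        norm_num
      rw [hinit]
      have hv : 0 ≤ innerMax x 0 (y :: ys) := innerMax_nonneg _ _ _ (le_refl 0)
      have := D_thread (y :: ys) (List.range ((y :: ys).length - 1)) (innerMax x 0 (y :: ys)) 0
      rw [show innerMax x 0 (y :: ys) = max (innerMax x 0 (y :: ys)) 0 by omega, this]
      rw [show List.foldl (fun acc k => innerMax ((y :: ys).getD k 0) acc (List.drop k (y :: ys))) 0
            (List.range ((y :: ys).length - 1)) = augMaxD (y :: ys) from rfl]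
      rw [ih]
      rfl

-- ===== VERDICT (by name: the statement is the Claim_ definition above) =====
theorem augMax_spec : Claim_equal_augMax := by
  intro liste _
  unfold Spec_augMax
  rw [A_eq_D, D_eq_specA, alt_eq_specA]
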